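-- pv_equiv track=rewrite | github.com/dpappas/pytorch_pacrr_and_posit_drmm | position_stats_relevant_snippets.py | get_the_mesh
-- ===== SOURCE A (Python) =====
-- def get_the_mesh(the_doc):
--     good_mesh = []
--     for t in the_doc['meshHeadingsList']:
--         t = t.split(':', 1)
--         t = t[1].strip()
--         t = t.lower()
--         good_mesh.append(t)
--     good_mesh = sorted(good_mesh)
--     good_mesh = ['mgmx'] + good_mesh
--     good_mesh = ' # '.join(good_mesh)
--     good_mesh = good_mesh.split()
--     return good_mesh
-- ===== SOURCE B (Python) =====
-- def get_the_mesh(the_doc):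
--     headings = sorted(h.split(':', 1)[1].strip().lower() for h in the_doc['meshHeadingsList'])
--     out = ['mgmx']
--     for h in headings:
--         out.append('#')
--         out.extend(h.split())
--     return out
-- ===== Notes on version B (the rewrite author's own statement) =====
-- stated objective: simpler
-- what changed: B builds the flat token list directly (append '#' then extend with heading.split() per sorted heading) instead of A's join of all headings into one ' # '-separated string followed by a whitespace re-split; the intermediate joined string disappears.
import Mathlib
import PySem

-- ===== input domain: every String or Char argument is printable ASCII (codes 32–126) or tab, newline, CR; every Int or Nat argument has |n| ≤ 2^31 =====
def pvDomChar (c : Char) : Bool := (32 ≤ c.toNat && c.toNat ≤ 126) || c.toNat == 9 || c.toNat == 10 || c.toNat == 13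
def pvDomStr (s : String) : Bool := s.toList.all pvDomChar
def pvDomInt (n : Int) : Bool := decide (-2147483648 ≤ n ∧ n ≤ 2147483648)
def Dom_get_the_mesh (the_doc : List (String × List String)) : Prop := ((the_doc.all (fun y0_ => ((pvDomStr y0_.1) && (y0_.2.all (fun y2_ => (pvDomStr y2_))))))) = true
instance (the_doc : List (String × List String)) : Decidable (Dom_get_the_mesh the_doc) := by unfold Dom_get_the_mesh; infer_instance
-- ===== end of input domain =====

-- B builds the flat token list directly (append '#' then extend with heading.split() per sorted
-- heading) instead of A's join into one ' # '-separated string followed by a whitespace re-split.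

-- ===== PORT A =====
-- t.split(':', 1)[1]: pyGet? is none exactly where Python raises IndexError (no ':'), outside Pre_
def pvParseA (t : String) : String :=
  let parts := (PySem.Str.splitMax? t ":" 1).getD []
  let t1 := (PySem.List.pyGet? parts 1).getD ""
  PySem.Str.lower (PySem.Str.strip t1)

def get_the_mesh (the_doc : List (String × List String)) : List String :=
  -- the_doc['meshHeadingsList']: get? is none exactly where Python raises KeyError, outside Pre_
  let lst := ((PySem.Dict.mk the_doc).get? "meshHeadingsList").getD []
  let good_mesh := lst.foldl (fun acc t => acc ++ [pvParseA t]) []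
  let good_mesh := PySem.List.sorted good_mesh (fun x => x) false
  let good_mesh := "mgmx" :: good_mesh
  let joined := PySem.Str.join " # " good_mesh
  PySem.Str.split₀ joined

-- ===== PORT B =====
-- h.split(':', 1)[1].strip().lower(): same raising points as A, outside Pre_
def pvParseB (h : String) : String :=
  PySem.Str.lower (PySem.Str.strip
    ((PySem.List.pyGet? ((PySem.Str.splitMax? h ":" 1).getD []) 1).getD ""))

def get_the_mesh_alt (the_doc : List (String × List String)) : List String :=
  let headings := (((PySem.Dict.mk the_doc).get? "meshHeadingsList").getD []).map pvParseB
  (PySem.List.sorted headings (fun x => x) false).foldl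
    (fun out h => out ++ ["#"] ++ PySem.Str.split₀ h) ["mgmx"]

-- ===== PRECONDITION & SPEC =====
-- Pre_ excludes exactly the inputs where Python A raises: a missing 'meshHeadingsList' key
-- (KeyError) or a heading without a ':' (IndexError on split(':',1)[1]).
def Pre_get_the_mesh (the_doc : List (String × List String)) : Prop :=
  ((PySem.Dict.mk the_doc).get? "meshHeadingsList").isSome = true ∧
  ∀ t ∈ ((PySem.Dict.mk the_doc).get? "meshHeadingsList").getD [], ':' ∈ t.toList
instance (the_doc : List (String × List String)) : Decidable (Pre_get_the_mesh the_doc) := by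
  unfold Pre_get_the_mesh; infer_instance

def pvWitness_get_the_mesh : (List (String × List String)) :=
  [("meshHeadingsList", ["mesh:Disease", "mesh:  Neo  PLASMS "])]

def Spec_get_the_mesh (the_doc : List (String × List String)) (out : List String) : Prop := out = get_the_mesh_alt the_doc
instance (the_doc : List (String × List String)) (out : List String) : Decidable (Spec_get_the_mesh the_doc out) := by unfold Spec_get_the_mesh; infer_instance

-- ===== CLAIM (what is proved, stated in full; the proofs are below) =====
def Claim_equal_get_the_mesh : Prop := ∀ (the_doc : List (String × List String)), Dom_get_the_mesh the_doc → Pre_get_the_mesh the_doc → Spec_get_the_mesh the_doc (get_the_mesh the_doc)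

-- ===== LEMMAS AND PROOFS =====

-- split₀.go with a non-empty accumulator: the accumulator is just prepended (reversed)
theorem pv_go_acc (s cur : List Char) (acc : List (List Char)) :
    PySem.Chars.split₀.go s cur acc = acc.reverse ++ PySem.Chars.split₀.go s cur [] := by
  induction s generalizing cur acc with
  | nil =>
    simp only [PySem.Chars.split₀.go]
    split_ifs <;> simp
  | cons c rest ih =>
    simp only [PySem.Chars.split₀.go]
    split_ifs with h1 h2
    · exact ih [] acc
    · rw [ih [] (cur.reverse :: acc), ih [] [cur.reverse]]
      simp
    · exact ih (c :: cur) acc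

-- a space splits: tokens of (xs ++ ' ' :: ys) are tokens of xs then tokens of ys
theorem pv_go_space (xs ys cur : List Char) (acc : List (List Char)) :
    PySem.Chars.split₀.go (xs ++ ' ' :: ys) cur acc =
      PySem.Chars.split₀.go xs cur acc ++ PySem.Chars.split₀.go ys [] [] := by
  induction xs generalizing cur acc with
  | nil =>
    simp only [List.nil_append, PySem.Chars.split₀.go]
    split_ifs with h1 h2
    · rw [pv_go_acc ys [] acc]
    · rw [pv_go_acc ys [] (cur.reverse :: acc)]
    · exact absurd (by decide : PySem.Chars.isspace ' ' = true) h1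
    · exact absurd (by decide : PySem.Chars.isspace ' ' = true) h1
  | cons c rest ih =>
    simp only [List.cons_append, PySem.Chars.split₀.go]
    split_ifs with h1 h2 <;>
      first
        | exact ih [] acc
        | exact ih [] (cur.reverse :: acc)
        | exact ih (c :: cur) acc

theorem pv_split_space (xs ys : List Char) :
    PySem.Chars.split₀ (xs ++ ' ' :: ys) = PySem.Chars.split₀ xs ++ PySem.Chars.split₀ ys := by
  unfold PySem.Chars.split₀
  exact pv_go_space xs ys [] []

-- whitespace-splitting the ' # '-join gives the head's tokens then, per item, '#' and its tokens
theorem pv_split_join (gs : List (List Char)) (m : List Char) :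
    PySem.Chars.split₀ (PySem.Chars.join [' ', '#', ' '] (m :: gs)) =
      PySem.Chars.split₀ m ++ gs.flatMap (fun g => ['#'] :: PySem.Chars.split₀ g) := by
  induction gs generalizing m with
  | nil => rw [PySem.Chars.join_singleton]; simp
  | cons g rest ih =>
    rw [PySem.Chars.join_cons_cons]
    have hshape : (m ++ [' ', '#', ' ']) ++ PySem.Chars.join [' ', '#', ' '] (g :: rest) =
        m ++ ' ' :: (['#'] ++ ' ' :: PySem.Chars.join [' ', '#', ' '] (g :: rest)) := by
      simp
    rw [hshape, pv_split_space m, pv_split_space ['#']]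
    rw [ih g]
    have hh : PySem.Chars.split₀ ['#'] = [['#']] := by decide
    rw [hh]
    simp

-- the B-side fold is A's join-then-split, for any list of headings
theorem pv_fold_eq_join_split (gs : List String) :
    PySem.Str.split₀ (PySem.Str.join " # " ("mgmx" :: gs)) =
      gs.foldl (fun out h => out ++ ["#"] ++ PySem.Str.split₀ h) ["mgmx"] := by
  have hfold : gs.foldl (fun out h => out ++ ["#"] ++ PySem.Str.split₀ h) ["mgmx"] =
      ["mgmx"] ++ gs.flatMap (fun h => ["#"] ++ PySem.Str.split₀ h) := by
    rw [← PySem.List.foldl_append_eq_flatMap (fun h => ["#"] ++ PySem.Str.split₀ h) gs ["mgmx"]]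
    simp [List.append_assoc]
  rw [hfold]
  show List.map String.ofList (PySem.Chars.split₀ (PySem.Str.join " # " ("mgmx" :: gs)).toList) = _
  rw [PySem.Str.toList_join]
  have hsep : (" # " : String).toList = [' ', '#', ' '] := by decide
  have hm : ("mgmx" : String).toList = ['m', 'g', 'm', 'x'] := by decide
  simp only [List.map_cons, hsep, hm]
  rw [pv_split_join (gs.map String.toList) ['m', 'g', 'm', 'x']]
  have hmg : PySem.Chars.split₀ ['m', 'g', 'm', 'x'] = [['m', 'g', 'm', 'x']] := by decide
  rw [hmg]
  have h1 : String.ofList ['m', 'g', 'm', 'x'] = "mgmx" := by decide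
  have h2 : String.ofList ['#'] = "#" := by decide
  simp [List.flatMap_map, List.map_flatMap, PySem.Str.split₀, h1, h2]

theorem pv_parse_eq : pvParseB = pvParseA := by
  funext t
  simp [pvParseA, pvParseB]

-- ===== VERDICT (by name: the statement is the Claim_ definition above) =====
theorem get_the_mesh_spec : Claim_equal_get_the_mesh := by
  intro the_doc _ _
  show PySem.Str.split₀ (PySem.Str.join " # " ("mgmx" ::
      PySem.List.sorted (List.foldl (fun acc t => acc ++ [pvParseA t]) []
        (((PySem.Dict.mk the_doc).get? "meshHeadingsList").getD [])) (fun x => x) false)) =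
    List.foldl (fun out h => out ++ ["#"] ++ PySem.Str.split₀ h) ["mgmx"]
      (PySem.List.sorted ((((PySem.Dict.mk the_doc).get? "meshHeadingsList").getD []).map pvParseB)
        (fun x => x) false)
  rw [PySem.List.foldl_append_singleton_eq_map, pv_parse_eq]
  simp only [List.nil_append]
  exact pv_fold_eq_join_split _
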